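-- pv_equiv track=rewrite | github.com/TimofeyUserKorotkov/PAS | tools — копия.py | create_palette
-- ===== SOURCE A (Python) =====
-- def create_palette(r, g, b, quantity, rich=0, step=1):
--     palette = []
--     cols, colors = [r, g, b], [r, g, b]
--     cols.sort()
--     part = 255 // cols[-1] // quantity if cols[-1] != 0 else 0
--     bs = 255 // rich - cols[-1] * part * quantity if rich == 1 else 0
--     bs = bs // cols[-1] if cols[-1] != 0 else 0
--     for i in range(1, quantity + 1, step):
--         palette.append([color * part * i + bs * color for color in colors])
--     return palette
-- ===== SOURCE B (Python) =====
-- def create_palette(r, g, b, quantity, rich=0, step=1):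
--     mx = max(r, g, b)
--     part = 255 // mx // quantity if mx else 0
--     bs = (255 // rich - mx * part * quantity) // mx if rich == 1 and mx else 0
--     row = [r * (part + bs), g * (part + bs), b * (part + bs)]
--     delta = [r * part * step, g * part * step, b * part * step]
--     palette = []
--     for _ in range(len(range(1, quantity + 1, step))):
--         palette.append(row)
--         row = [x + d for x, d in zip(row, delta)]
--     return palette
-- ===== Notes on version B (the rewrite author's own statement) =====
-- stated objective: alternative
-- what changed: B drops the sort (max of three values suffices) and builds the palette with a running accumulator row advanced by a constant delta vector per step, instead of recomputing color*part*i for every i.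
import Mathlib
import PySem

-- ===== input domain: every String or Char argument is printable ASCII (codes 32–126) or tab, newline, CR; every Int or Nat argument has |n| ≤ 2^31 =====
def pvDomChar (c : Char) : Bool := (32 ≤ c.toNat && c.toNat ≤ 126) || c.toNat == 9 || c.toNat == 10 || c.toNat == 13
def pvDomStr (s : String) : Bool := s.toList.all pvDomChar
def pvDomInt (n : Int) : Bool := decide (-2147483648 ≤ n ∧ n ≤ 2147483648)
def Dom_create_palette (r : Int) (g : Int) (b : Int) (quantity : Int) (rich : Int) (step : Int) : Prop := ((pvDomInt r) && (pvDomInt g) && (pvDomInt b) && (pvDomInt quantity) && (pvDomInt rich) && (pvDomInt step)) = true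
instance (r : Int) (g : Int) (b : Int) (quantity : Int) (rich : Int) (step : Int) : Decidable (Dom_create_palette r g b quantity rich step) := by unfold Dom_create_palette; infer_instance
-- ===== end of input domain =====

-- B replaces the per-i multiplications of A's loop by a running-accumulator row that is
-- advanced by a constant delta vector each step (objective: alternative decomposition, same cost).

-- ===== PORT A =====
def create_palette (r : Int) (g : Int) (b : Int) (quantity : Int) (rich : Int) (step : Int) : List (List Int) :=
  let cols : List Int := PySem.List.sorted [r, g, b] (fun x => x) false
  let colors : List Int := [r, g, b]
  -- cols[-1]: cols always has 3 elements, so pyGet? never fails; getD 0 is unreachable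
  let mx : Int := (PySem.List.pyGet? cols (-1)).getD 0
  let part : Int := if mx ≠ 0 then PySem.Int.floordiv (PySem.Int.floordiv 255 mx) quantity else 0
  let bs0 : Int := if rich = 1 then PySem.Int.floordiv 255 rich - mx * part * quantity else 0
  let bs : Int := if mx ≠ 0 then PySem.Int.floordiv bs0 mx else 0
  (PySem.List.pyRange 1 (quantity + 1) step).foldl
    (fun palette i => palette ++ [colors.map (fun color => color * part * i + bs * color)]) []

-- ===== PORT B =====
def create_palette_alt (r : Int) (g : Int) (b : Int) (quantity : Int) (rich : Int) (step : Int) : List (List Int) :=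
  let mx : Int := max r (max g b)
  let part : Int := if mx ≠ 0 then PySem.Int.floordiv (PySem.Int.floordiv 255 mx) quantity else 0
  let bs : Int := if rich = 1 ∧ mx ≠ 0 then
      PySem.Int.floordiv (PySem.Int.floordiv 255 rich - mx * part * quantity) mx else 0
  let row : List Int := [r * (part + bs), g * (part + bs), b * (part + bs)]
  let delta : List Int := [r * part * step, g * part * step, b * part * step]
  let n : Nat := (PySem.List.pyRange 1 (quantity + 1) step).length
  ((List.range n).foldl
      (fun (st : List (List Int) × List Int) _ =>
        (st.1 ++ [st.2], List.zipWith (· + ·) st.2 delta))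
      ([], row)).1

-- ===== PRECONDITION & SPEC =====
-- A raises ValueError when step = 0 (range step) and ZeroDivisionError when quantity = 0
-- while max(r,g,b) ≠ 0; B raises on exactly the same inputs.
def Pre_create_palette (r : Int) (g : Int) (b : Int) (quantity : Int) (rich : Int) (step : Int) : Prop :=
  step ≠ 0 ∧ (quantity ≠ 0 ∨ max r (max g b) = 0)
instance (r : Int) (g : Int) (b : Int) (quantity : Int) (rich : Int) (step : Int) : Decidable (Pre_create_palette r g b quantity rich step) := by unfold Pre_create_palette; infer_instance

def pvWitness_create_palette : Int × Int × Int × Int × Int × Int := (3, 5, 2, 4, 1, 1)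

def Spec_create_palette (r : Int) (g : Int) (b : Int) (quantity : Int) (rich : Int) (step : Int) (out : List (List Int)) : Prop := out = create_palette_alt r g b quantity rich step
instance (r : Int) (g : Int) (b : Int) (quantity : Int) (rich : Int) (step : Int) (out : List (List Int)) : Decidable (Spec_create_palette r g b quantity rich step out) := by unfold Spec_create_palette; infer_instance

-- ===== CLAIM (what is proved, stated in full; the proofs are below) =====
def Claim_equal_create_palette : Prop := ∀ (r : Int) (g : Int) (b : Int) (quantity : Int) (rich : Int) (step : Int), Dom_create_palette r g b quantity rich step → Pre_create_palette r g b quantity rich step → Spec_create_palette r g b quantity rich step (create_palette r g b quantity rich step)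

-- ===== LEMMAS AND PROOFS =====

-- the last element of sorted [r,g,b] is max r (max g b)
lemma sorted3_eq (r g b : Int) (ys : List Int) (hp : ys.Perm [r, g, b])
    (hs : ys.Pairwise (· ≤ ·)) :
    PySem.List.sorted [r, g, b] (fun x => x) false = ys :=
  PySem.List.sorted_id_eq_of_perm_of_pairwise _ _ hp hs

lemma sorted3_last (r g b : Int) :
    (PySem.List.pyGet? (PySem.List.sorted [r, g, b] (fun x => x) false) (-1)).getD 0
      = max r (max g b) := by
  rcases le_total r g with h1 | h1 <;> rcases le_total g b with h2 | h2
  · rw [sorted3_eq r g b [r, g, b] (List.Perm.refl _) (by simp; omega)]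
    simp [PySem.List.pyGet?, PySem.List.pyIdx?]; omega
  · rcases le_total r b with h3 | h3
    · rw [sorted3_eq r g b [r, b, g] (List.Perm.cons r (List.Perm.swap g b []))
        (by simp; omega)]
      simp [PySem.List.pyGet?, PySem.List.pyIdx?]; omega
    · rw [sorted3_eq r g b [b, r, g]
        ((List.Perm.swap r b [g]).trans (List.Perm.cons r (List.Perm.swap g b [])))
        (by simp; omega)]
      simp [PySem.List.pyGet?, PySem.List.pyIdx?]; omega
  · rcases le_total r b with h3 | h3
    · rw [sorted3_eq r g b [g, r, b] (List.Perm.swap r g [b]) (by simp; omega)]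
      simp [PySem.List.pyGet?, PySem.List.pyIdx?]; omega
    · rw [sorted3_eq r g b [g, b, r]
        ((List.Perm.cons g (List.Perm.swap r b [])).trans (List.Perm.swap r g [b]))
        (by simp; omega)]
      simp [PySem.List.pyGet?, PySem.List.pyIdx?]; omega
  · rw [sorted3_eq r g b [b, g, r]
      ((List.Perm.swap g b [r]).trans
        ((List.Perm.cons g (List.Perm.swap r b [])).trans (List.Perm.swap r g [b])))
      (by simp; omega)]
    simp [PySem.List.pyGet?, PySem.List.pyIdx?]; omega

-- 0 // m = 0 in Python
lemma floordiv_zero_left (m : Int) : PySem.Int.floordiv 0 m = 0 := by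
  simp [PySem.Int.floordiv]

-- A's loop is a map
lemma foldl_append_map (l : List Int) (f : Int → List Int) (init : List (List Int)) :
    l.foldl (fun acc i => acc ++ [f i]) init = init ++ l.map f := by
  induction l generalizing init with
  | nil => simp
  | cons x t ih => simp [List.foldl_cons, ih]

-- B's loop: full state after n iterations
lemma alt_loop (dx dy dz : Int) : ∀ (n : Nat) (acc : List (List Int)) (x y z : Int),
    (List.range n).foldl
      (fun (st : List (List Int) × List Int) _ =>
        (st.1 ++ [st.2], List.zipWith (· + ·) st.2 [dx, dy, dz]))
      (acc, [x, y, z])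
    = (acc ++ (List.range n).map
          (fun k : Nat => [x + (k : Int) * dx, y + (k : Int) * dy, z + (k : Int) * dz]),
       [x + (n : Int) * dx, y + (n : Int) * dy, z + (n : Int) * dz]) := by
  intro n
  induction n with
  | zero => intro acc x y z; simp
  | succ m ih =>
    intro acc x y z
    rw [List.range_succ, List.foldl_append, ih, List.foldl_cons, List.foldl_nil]
    refine Prod.ext ?_ ?_
    · simp [List.map_append, List.append_assoc]
    · show List.zipWith (· + ·) [x + (m : Int) * dx, y + (m : Int) * dy,
          z + (m : Int) * dz] [dx, dy, dz] =
        [x + ((m + 1 : Nat) : Int) * dx, y + ((m + 1 : Nat) : Int) * dy,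
          z + ((m + 1 : Nat) : Int) * dz]
      simp only [List.zipWith, List.cons.injEq, and_true]
      push_cast
      exact ⟨by ring, by ring, by ring⟩

-- pyRange is a map over List.range of its own length
lemma pyRange_eq_map (a b s : Int) :
    PySem.List.pyRange a b s
      = (List.range (PySem.List.pyRange a b s).length).map
          (fun k : Nat => a + s * (k : Int)) := by
  unfold PySem.List.pyRange
  split_ifs with h <;>
    simp only [List.length_map, List.length_range, List.length_nil, List.range_zero,
      List.map_nil]

-- ===== VERDICT (by name: the statement is the Claim_ definition above) =====
theorem create_palette_spec : Claim_equal_create_palette := by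
  intro r g b quantity rich step hdom hpre
  unfold Spec_create_palette create_palette create_palette_alt
  dsimp only
  rw [sorted3_last]
  set M := max r (max g b) with hM
  set P := (if M ≠ 0 then PySem.Int.floordiv (PySem.Int.floordiv 255 M) quantity else 0)
    with hP
  have hbs : (if M ≠ 0 then
        PySem.Int.floordiv (if rich = 1 then
          PySem.Int.floordiv 255 rich - M * P * quantity else 0) M else 0)
      = (if rich = 1 ∧ M ≠ 0 then
          PySem.Int.floordiv (PySem.Int.floordiv 255 rich - M * P * quantity) M else 0) := by
    by_cases hr : rich = 1 <;> by_cases hm : M = 0 <;> simp [hr, hm, floordiv_zero_left]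
  rw [hbs]
  set B := (if rich = 1 ∧ M ≠ 0 then
      PySem.Int.floordiv (PySem.Int.floordiv 255 rich - M * P * quantity) M else 0) with hB
  rw [foldl_append_map, alt_loop]
  simp only [List.nil_append]
  rw [pyRange_eq_map 1 (quantity + 1) step, List.map_map, List.length_map,
    List.length_range]
  refine List.map_congr_left ?_
  intro k hk
  simp only [Function.comp_apply, List.map_cons, List.map_nil, List.cons.injEq, and_true]
  exact ⟨by ring, by ring, by ring⟩
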